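-- pv_equiv track=rewrite | github.com/ANchangwan/Algorithm-for-Python | 프로그래머스/포켓몬.py | solution
-- ===== SOURCE A (Python) =====
-- def solution(nums):
--     answer = 0
--     length = len(nums) // 2
--     monster = list(set(nums))
--
--     for x in monster:
--         if answer < length:
--             answer += 1
--
--     return answer
-- ===== SOURCE B (Python) =====
-- def solution(nums):
--     return min(len(set(nums)), len(nums) // 2)
-- ===== Notes on version B (the rewrite author's own statement) =====
-- stated objective: simpler
-- what changed: The counting loop over the distinct elements is removed entirely and replaced by the closed form min(len(set(nums)), len(nums)//2).
import Mathlib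
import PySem

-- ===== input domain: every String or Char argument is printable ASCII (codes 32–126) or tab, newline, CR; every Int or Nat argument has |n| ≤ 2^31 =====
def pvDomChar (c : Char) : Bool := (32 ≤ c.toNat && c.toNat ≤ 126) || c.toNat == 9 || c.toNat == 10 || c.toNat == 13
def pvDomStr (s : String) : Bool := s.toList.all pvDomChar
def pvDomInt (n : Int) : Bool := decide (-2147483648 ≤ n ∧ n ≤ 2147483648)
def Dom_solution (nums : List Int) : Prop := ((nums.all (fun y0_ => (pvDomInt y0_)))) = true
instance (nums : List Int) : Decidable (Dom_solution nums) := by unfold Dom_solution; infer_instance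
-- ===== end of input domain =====

-- B replaces A's counting loop over the distinct elements by the closed form
-- min(len(set(nums)), len(nums)//2); objective: simpler.

-- ===== PORT A =====
def solution (nums : List Int) : Int :=
  let length : Int := PySem.Int.floordiv (nums.length : Int) 2
  let monster : PySem.Set Int := PySem.Set.ofList nums
  monster.foldl (fun answer _ => if answer < length then answer + 1 else answer) 0

-- ===== PORT B =====
def solution_alt (nums : List Int) : Int :=
  min ((PySem.Set.ofList nums).length : Int) (PySem.Int.floordiv (nums.length : Int) 2)

-- ===== PRECONDITION & SPEC =====
def Spec_solution (nums : List Int) (out : Int) : Prop := out = solution_alt nums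
instance (nums : List Int) (out : Int) : Decidable (Spec_solution nums out) := by unfold Spec_solution; infer_instance

-- ===== CLAIM (what is proved, stated in full; the proofs are below) =====
def Claim_equal_solution : Prop := ∀ (nums : List Int), Dom_solution nums → Spec_solution nums (solution nums)

-- ===== LEMMAS AND PROOFS =====

theorem pv_count_fold (xs : List Int) (L : Int) :
    ∀ a : Int, a ≤ L →
      xs.foldl (fun answer _ => if answer < L then answer + 1 else answer) a
        = min (a + xs.length) L := by
  induction xs with
  | nil => intro a ha; simp; omega
  | cons x tl ih =>
    intro a ha
    simp only [List.foldl_cons]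
    by_cases h : a < L
    · simp only [h, if_pos]
      rw [ih (a + 1) (by omega)]
      simp [List.length_cons]; omega
    · simp only [h, if_neg, not_false_iff]
      rw [ih a ha]
      simp [List.length_cons]; omega

-- ===== VERDICT (by name: the statement is the Claim_ definition above) =====
theorem solution_spec : Claim_equal_solution := by
  intro nums _
  unfold Spec_solution solution solution_alt
  have hL : (0 : Int) ≤ PySem.Int.floordiv (nums.length : Int) 2 := by
    rw [PySem.Int.floordiv_eq_ediv_of_pos (by omega)]
    positivity
  rw [pv_count_fold _ _ 0 hL]
  omega
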